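-- pv_equiv track=rewrite | github.com/meengcoon/Diaries-system | pipeline/segment.py | _split_paragraph_into_blocks
-- ===== SOURCE A (Python) =====
-- from typing import List, Dict, Any, Tuple, Optional
--
-- def _split_paragraph_into_blocks(paragraph_body: str, max_chars: int = 800) -> List[str]:
--     """
--     段落内切 block（段落之间永不合并）：
--     - 每块尽量在 <= max_chars 内，从后往前找最近的句末标点（。！？!? 以及 '.'）。
--     - '.' 只在后面是空白或结尾时才算句末，避免把缩写乱切。
--     - 找不到句末标点就硬切 max_chars。
--     """
--     s = (paragraph_body or "").strip()
--     if not s: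
--         return []
--
--     ends = set("。！？!?")
--     blocks: List[str] = []
--
--     while s:
--         if len(s) <= max_chars:
--             blocks.append(s.strip())
--             break
--
--         window = max_chars
--         cut = window
--
--         # 从 window 往前找最近句末标点
--         for i in range(window - 1, -1, -1):
--             ch = s[i]
--             if ch in ends:
--                 cut = i + 1
--                 break
--             if ch == ".":
--                 nxt = s[i + 1] if i + 1 < len(s) else ""
--                 if nxt == "" or nxt.isspace():
--                     cut = i + 1
--                     break
--
--         chunk = s[:cut].strip()
--         if chunk:
--             blocks.append(chunk)
--
--         s = s[cut:].lstrip()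
--
--     return blocks
-- ===== SOURCE B (Python) =====
-- import bisect
-- from typing import List
--
-- def _split_paragraph_into_blocks(paragraph_body: str, max_chars: int = 800) -> List[str]:
--     """Precompute all sentence-end cut offsets once, then emit blocks greedily
--     with a start pointer and a bisect lookup instead of a backward scan per block."""
--     s = (paragraph_body or "").strip()
--     n = len(s)
--     if n == 0:
--         return []
--     ends = "。！？!?"
--     cuts = [i + 1 for i, ch in enumerate(s)
--             if ch in ends or (ch == "." and (i + 1 == n or s[i + 1].isspace()))]
--     blocks: List[str] = []
--     p = 0
--     while n - p > max_chars:
--         hi = p + max_chars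
--         k = bisect.bisect_right(cuts, hi)
--         e = cuts[k - 1] if k > 0 and cuts[k - 1] > p else hi
--         block = s[p:e].strip()
--         if block:
--             blocks.append(block)
--         p = e
--         while p < n and s[p].isspace():
--             p += 1
--     blocks.append(s[p:])
--     return blocks
-- ===== Notes on version B (the rewrite author's own statement) =====
-- stated objective: alternative
-- what changed: Instead of re-scanning backwards through the window for every block, B builds the sorted list of all sentence-end cut offsets once and emits blocks with a moving start pointer, finding each cut by bisect and skipping inter-block whitespace by advancing the pointer.
import Mathlib
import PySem

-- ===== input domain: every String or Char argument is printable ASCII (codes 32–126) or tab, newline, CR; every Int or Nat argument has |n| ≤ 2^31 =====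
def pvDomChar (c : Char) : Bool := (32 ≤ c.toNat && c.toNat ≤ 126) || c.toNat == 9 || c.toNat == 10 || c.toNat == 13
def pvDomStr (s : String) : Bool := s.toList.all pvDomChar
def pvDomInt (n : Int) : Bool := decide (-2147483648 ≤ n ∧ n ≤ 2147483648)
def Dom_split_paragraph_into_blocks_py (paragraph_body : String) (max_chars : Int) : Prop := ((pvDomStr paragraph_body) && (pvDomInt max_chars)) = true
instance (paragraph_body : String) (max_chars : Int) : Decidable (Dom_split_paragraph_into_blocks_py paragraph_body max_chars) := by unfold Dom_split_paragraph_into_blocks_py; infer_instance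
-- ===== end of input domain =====

-- B replaces A's per-block backward scan by one precomputed sorted list of sentence-end
-- offsets consumed with a bisect lookup and a moving start pointer (objective: alternative).

-- ===== PORT A =====
def pvEndsA : List Char := ['。', '！', '？', '!', '?']

-- the body of A's backward for-loop: is position i of s a sentence end?
def pvCondA (s : List Char) (i : Int) : Bool :=
  match PySem.List.pyGet? s i with
  | none => false
  | some ch =>
    if pvEndsA.contains ch then true
    else if ch = '.' then
      match PySem.List.pyGet? s (i + 1) with
      | none => true            -- nxt = "" → "" counts as sentence end
      | some nxt => PySem.Chars.isspace nxt
    else false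

-- 'for i in range(window-1,-1,-1): … break' = first hit of the countdown scan
def pvCutA (s : List Char) (max_chars : Int) : Int :=
  match (PySem.List.pyRange (max_chars - 1) (-1) (-1)).find? (fun i => pvCondA s i) with
  | some i => i + 1
  | none => max_chars

def pvLoopA (max_chars : Int) : Nat → List Char → List String → List String
  | 0, _, blocks => blocks
  | Nat.succ fuel, s, blocks =>
    if s.isEmpty then blocks
    else if (s.length : Int) ≤ max_chars then blocks ++ [String.ofList (PySem.Chars.strip s)]
    else
      let cut := pvCutA s max_chars
      let chunk := PySem.Chars.strip (PySem.List.slice s none (some cut))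
      let blocks' := if chunk.isEmpty then blocks else blocks ++ [String.ofList chunk]
      pvLoopA max_chars fuel (PySem.Chars.lstrip (PySem.List.slice s (some cut) none)) blocks'

def split_paragraph_into_blocks_py (paragraph_body : String) (max_chars : Int) : List String :=
  let s := PySem.Chars.strip paragraph_body.toList
  if s.isEmpty then [] else pvLoopA max_chars (s.length + 1) s []

-- ===== PORT B =====
def pvEndsB : List Char := ['。', '！', '？', '!', '?']

-- the comprehension's filter: position i (holding ch) of s is a sentence end
def pvCondB (s : List Char) (i : Int) (ch : Char) : Bool :=
  pvEndsB.contains ch ||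
  (ch = '.' && (i + 1 = (s.length : Int) ||
    (match PySem.List.pyGet? s (i + 1) with
     | some nxt => PySem.Chars.isspace nxt
     | none => false)))

-- cuts = [i+1 for i, ch in enumerate(s) if …]
def pvCuts (s : List Char) : List Int :=
  (PySem.List.enumerate s 0).filterMap
    (fun p => if pvCondB s p.1 p.2 then some (p.1 + 1) else none)

-- while p < n and s[p].isspace(): p += 1
def pvSkipWs (s : List Char) : Nat → Int → Int
  | 0, p => p
  | Nat.succ fuel, p =>
    if p < (s.length : Int) then
      match PySem.List.pyGet? s p with
      | some c => if PySem.Chars.isspace c then pvSkipWs s fuel (p + 1) else p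
      | none => p
    else p

def pvLoopB (s : List Char) (cuts : List Int) (max_chars : Int) :
    Nat → Int → List String → List String
  | 0, _, blocks => blocks
  | Nat.succ fuel, p, blocks =>
    if (s.length : Int) - p > max_chars then
      let hi := p + max_chars
      let k := PySem.List.bisectRight cuts hi
      let e := if 0 < k then
                 (if cuts.getD (k - 1) 0 > p then cuts.getD (k - 1) 0 else hi)
               else hi
      let block := PySem.Chars.strip (PySem.List.slice s (some p) (some e))
      let blocks' := if block.isEmpty then blocks else blocks ++ [String.ofList block]
      pvLoopB s cuts max_chars fuel (pvSkipWs s s.length e) blocks'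
    else blocks ++ [String.ofList (PySem.List.slice s (some p) none)]

def split_paragraph_into_blocks_py_alt (paragraph_body : String) (max_chars : Int) : List String :=
  let s := PySem.Chars.strip paragraph_body.toList
  if s.isEmpty then []
  else pvLoopB s (pvCuts s) max_chars (s.length + 1) 0 []

-- ===== PRECONDITION & SPEC =====
-- Pre_ excludes max_chars ≤ 0 with non-whitespace input, where A's while-loop never
-- shrinks s and A DIVERGES (infinite loop); whitespace-only inputs return [] for any max_chars.
def Pre_split_paragraph_into_blocks_py (paragraph_body : String) (max_chars : Int) : Prop :=
  1 ≤ max_chars ∨ PySem.Chars.strip paragraph_body.toList = []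
instance (paragraph_body : String) (max_chars : Int) : Decidable (Pre_split_paragraph_into_blocks_py paragraph_body max_chars) := by unfold Pre_split_paragraph_into_blocks_py; infer_instance

def pvWitness_split_paragraph_into_blocks_py : String × Int := ("Hi there. Bye! ok", 9)

def Spec_split_paragraph_into_blocks_py (paragraph_body : String) (max_chars : Int) (out : List String) : Prop := out = split_paragraph_into_blocks_py_alt paragraph_body max_chars
instance (paragraph_body : String) (max_chars : Int) (out : List String) : Decidable (Spec_split_paragraph_into_blocks_py paragraph_body max_chars out) := by unfold Spec_split_paragraph_into_blocks_py; infer_instance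

-- ===== CLAIM (what is proved, stated in full; the proofs are below) =====
def Claim_equal_split_paragraph_into_blocks_py : Prop := ∀ (paragraph_body : String) (max_chars : Int), Dom_split_paragraph_into_blocks_py paragraph_body max_chars → Pre_split_paragraph_into_blocks_py paragraph_body max_chars → Spec_split_paragraph_into_blocks_py paragraph_body max_chars (split_paragraph_into_blocks_py paragraph_body max_chars)

-- ===== LEMMAS AND PROOFS =====

theorem pv_witness_ok : Dom_split_paragraph_into_blocks_py pvWitness_split_paragraph_into_blocks_py.1 pvWitness_split_paragraph_into_blocks_py.2 ∧ Pre_split_paragraph_into_blocks_py pvWitness_split_paragraph_into_blocks_py.1 pvWitness_split_paragraph_into_blocks_py.2 := by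
  constructor
  · decide
  · left; decide

-- strip is the identity on a non-empty list whose first and last characters are not whitespace
theorem pv_strip_id (cs : List Char) (hne : cs ≠ [])
    (h1 : PySem.Chars.isspace (cs.getD 0 ' ') = false)
    (h2 : PySem.Chars.isspace (cs.getLast hne) = false) :
    PySem.Chars.strip cs = cs := by
  have hl : PySem.Chars.lstrip cs = cs := by
    unfold PySem.Chars.lstrip
    cases cs with
    | nil => rfl
    | cons a t => simp only [List.getD_cons_zero] at h1; simp [h1]
  have h2' : PySem.Chars.isspace (cs.reverse.head (by simpa using hne)) = false := by
    rw [List.head_reverse]; exact h2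
  unfold PySem.Chars.strip
  rw [hl]
  unfold PySem.Chars.rstrip
  cases hc : cs.reverse with
  | nil => simp_all
  | cons a t =>
    simp only [hc, List.head_cons] at h2'
    rw [List.dropWhile_cons]
    simp only [h2', Bool.false_eq_true, ite_false]
    rw [← hc, List.reverse_reverse]

-- characterisation of A's backward for-loop (first hit of the countdown scan)
theorem pv_find_countdown (P : Int → Bool) (m : Nat) :
    ((PySem.List.pyRange ((m : Int) - 1) (-1) (-1)).find? P = none →
      ∀ j : Nat, j < m → P j = false) ∧
    (∀ i, (PySem.List.pyRange ((m : Int) - 1) (-1) (-1)).find? P = some i →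
      0 ≤ i ∧ i < m ∧ P i = true ∧ ∀ j : Nat, i < j → j < m → P j = false) := by
  induction m with
  | zero =>
    rw [PySem.List.pyRange_neg_one_eq_nil (by norm_num)]
    constructor
    · intro _ j hj; omega
    · intro i h; simp at h
  | succ m ih =>
    rw [PySem.List.pyRange_neg_one_cons (by push_cast; omega)]
    rw [List.find?_cons]
    push_cast
    rw [show ((m:Int) + 1 - 1) = (m:Int) by ring]
    by_cases hP : P m = true
    · simp only [hP]
      constructor
      · intro h; simp at h
      · intro i h
        simp only [Option.some.injEq] at h
        subst h
        refine ⟨by positivity, by exact_mod_cast Nat.lt_succ_self m, hP, ?_⟩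
        intro j hj hjm; omega
    · simp only [Bool.not_eq_true] at hP
      simp only [hP]
      constructor
      · intro h j hj
        rcases Nat.lt_succ_iff_lt_or_eq.mp hj with h' | h'
        · exact ih.1 h j h'
        · subst h'; exact hP
      · intro i h
        obtain ⟨h0, hlt, hPi, hmax⟩ := ih.2 i h
        refine ⟨h0, by omega, hPi, ?_⟩
        intro j hj hjm
        rcases Nat.lt_succ_iff_lt_or_eq.mp hjm with h' | h'
        · exact hmax j hj h'
        · subst h'; exact hP

-- cuts membership
theorem pv_mem_cuts (s : List Char) (c : Int) :
    c ∈ pvCuts s ↔ ∃ (k : Nat) (h : k < s.length), pvCondB s k s[k] = true ∧ c = (k : Int) + 1 := by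
  unfold pvCuts
  rw [List.mem_filterMap]
  constructor
  · rintro ⟨p, hp, hf⟩
    obtain ⟨k, hk, rfl⟩ := (PySem.List.mem_enumerate_iff _ _ _).mp hp
    simp only [zero_add] at hf ⊢
    by_cases hc : pvCondB s k s[k] = true
    · exact ⟨k, hk, hc, by simp [hc] at hf; omega⟩
    · simp only [Bool.not_eq_true] at hc; simp [hc] at hf
  · rintro ⟨k, hk, hc, rfl⟩
    refine ⟨((k : Int), s[k]), ?_, ?_⟩
    · exact (PySem.List.mem_enumerate_iff _ _ _).mpr ⟨k, hk, by simp⟩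
    · simp [hc]

-- cuts strictly sorted
theorem pv_cuts_sorted (s : List Char) : (pvCuts s).Pairwise (· < ·) := by
  unfold pvCuts
  rw [List.pairwise_filterMap]
  apply List.Pairwise.imp ?_ (PySem.List.pairwise_lt_enumerate s 0)
  intro a b hab x hx y hy
  split at hx <;> split at hy <;> simp_all <;> omega

-- skipping whitespace from q is dropWhile on the suffix
theorem pv_skipws_gen (s : List Char) : ∀ (fuel q : Nat), q ≤ s.length → s.length - q ≤ fuel →
    pvSkipWs s fuel q = (q : Int) + ((s.drop q).takeWhile PySem.Chars.isspace).length := by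
  intro fuel
  induction fuel with
  | zero =>
    intro q hq hf
    have : q = s.length := by omega
    subst this
    simp [pvSkipWs]
  | succ fuel ih =>
    intro q hq hf
    unfold pvSkipWs
    by_cases hlt : q < s.length
    · rw [if_pos (by exact_mod_cast hlt)]
      rw [PySem.List.pyGet?_natCast, List.getElem?_eq_getElem hlt]
      have hdrop : s.drop q = s[q] :: s.drop (q + 1) := by
        rw [List.drop_eq_getElem_cons hlt]
      by_cases hsp : PySem.Chars.isspace s[q] = true
      · simp only [hsp, if_true]
        rw [show ((q:Int) + 1) = ((q + 1 : Nat) : Int) by push_cast; ring,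
          ih (q + 1) (by omega) (by omega), hdrop, List.takeWhile_cons, hsp]
        simp; push_cast; ring
      · simp only [Bool.not_eq_true] at hsp
        simp only [hsp, Bool.false_eq_true, if_false]
        rw [hdrop, List.takeWhile_cons, hsp]
        simp
    · have : q = s.length := by omega
      subst this
      simp

-- A's per-character test on the suffix agrees with B's absolute-position test
theorem pv_bridge (s0 : List Char) (p j m : Nat) (hj : j < m)
    (hlt : (m : Int) < (s0.length : Int) - (p : Int)) (hpj : p + j < s0.length) :
    pvCondA (s0.drop p) (j : Int) = pvCondB s0 ((p + j : Nat) : Int) s0[p + j] := by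
  have hpj1 : p + j + 1 < s0.length := by omega
  have h1 : PySem.List.pyGet? (s0.drop p) (j : Int) = some s0[p + j] := by
    rw [PySem.List.pyGet?_natCast, List.getElem?_drop]
    exact List.getElem?_eq_getElem hpj
  have h2 : PySem.List.pyGet? (s0.drop p) ((j : Int) + 1) = some s0[p + j + 1] := by
    rw [show ((j:Int) + 1) = ((j + 1 : Nat) : Int) by push_cast; ring,
      PySem.List.pyGet?_natCast, List.getElem?_drop]
    exact List.getElem?_eq_getElem (by omega)
  have h3 : PySem.List.pyGet? s0 (((p + j : Nat) : Int) + 1) = some s0[p + j + 1] := by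
    rw [show (((p + j : Nat):Int) + 1) = ((p + j + 1 : Nat) : Int) by push_cast; ring,
      PySem.List.pyGet?_natCast]
    exact List.getElem?_eq_getElem hpj1
  unfold pvCondA pvCondB
  rw [h1, h2, h3]
  have hends : pvEndsA = pvEndsB := rfl
  rw [hends]
  have hne2 : ((p : Int) + (j : Int) + 1 = (s0.length : Int)) = False := by
    simp only [eq_iff_iff, iff_false]
    intro h; omega
  by_cases hcont : s0[p + j] ∈ pvEndsB
  · simp [hcont]
  · by_cases hdot : s0[p + j] = '.'
    · simp [hcont, hdot, hne2]
    · simp [hcont, hdot]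

-- the bisect step finds exactly A's cut, in absolute offsets
theorem pv_cut_eq (s0 : List Char) (mc : Int) (p : Nat) (hmc : 1 ≤ mc)
    (hlt : mc < (s0.length : Int) - p) :
    (let hi := (p : Int) + mc
     let k := PySem.List.bisectRight (pvCuts s0) hi
     if 0 < k then
       (if (pvCuts s0).getD (k - 1) 0 > (p : Int) then (pvCuts s0).getD (k - 1) 0 else hi)
     else hi) = (p : Int) + pvCutA (s0.drop p) mc := by
  obtain ⟨m, rfl⟩ : ∃ m : Nat, mc = (m : Int) := ⟨mc.toNat, (Int.toNat_of_nonneg (by omega)).symm⟩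
  have hm1 : 1 ≤ m := by exact_mod_cast hmc
  have hpm : p + m < s0.length := by
    omega
  dsimp only
  have hsorted := pv_cuts_sorted s0
  have hle : (pvCuts s0).Pairwise (· ≤ ·) := hsorted.imp (fun h => le_of_lt h)
  obtain ⟨hk_le, hlt_le, hgt⟩ := PySem.List.bisectRight_spec (pvCuts s0) ((p : Int) + m) hle
  have hmono : ∀ (a b : Nat) (ha : a < (pvCuts s0).length) (hb : b < (pvCuts s0).length),
      a ≤ b → (pvCuts s0)[a] ≤ (pvCuts s0)[b] := by
    intro a b ha hb hab
    rcases Nat.lt_or_ge a b with h | h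
    · exact le_of_lt (List.pairwise_iff_getElem.mp hsorted a b ha hb h)
    · have : a = b := by omega
      subst this; exact le_refl _
  unfold pvCutA
  cases hF : (PySem.List.pyRange ((m : Int) - 1) (-1) (-1)).find? (fun i => pvCondA (s0.drop p) i) with
  | none =>
    have hnone := (pv_find_countdown (fun i => pvCondA (s0.drop p) i) m).1 hF
    have hnotake : ¬ (0 < PySem.List.bisectRight (pvCuts s0) ((p : Int) + m) ∧
        (pvCuts s0).getD (PySem.List.bisectRight (pvCuts s0) ((p : Int) + m) - 1) 0 > (p : Int)) := by
      rintro ⟨hk, hc⟩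
      have hklen : PySem.List.bisectRight (pvCuts s0) ((p : Int) + m) - 1 < (pvCuts s0).length := by omega
      rw [List.getD_eq_getElem _ _ hklen] at hc
      have hchi : (pvCuts s0)[PySem.List.bisectRight (pvCuts s0) ((p : Int) + m) - 1] ≤ (p : Int) + m :=
        hlt_le _ hklen (by omega)
      obtain ⟨k0, hk0n, hcond, hceq⟩ := (pv_mem_cuts s0 _).mp (List.getElem_mem hklen)
      rw [hceq] at hc hchi
      have hpk0 : p ≤ k0 := by omega
      have hk0m : k0 < p + m := by omega
      have hbr := pv_bridge s0 p (k0 - p) m (by omega) (by push_cast; omega) (by omega)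
      simp only [show p + (k0 - p) = k0 from by omega] at hbr
      have : pvCondA (s0.drop p) ((k0 - p : Nat) : Int) = false := hnone (k0 - p) (by omega)
      rw [hbr] at this
      rw [this] at hcond
      exact absurd hcond (by simp)
    by_cases hk : 0 < PySem.List.bisectRight (pvCuts s0) ((p : Int) + m)
    · rw [if_pos hk, if_neg (fun hc => hnotake ⟨hk, hc⟩)]
    · rw [if_neg hk]
  | some i =>
    obtain ⟨h0, him, hPi, hmax⟩ := (pv_find_countdown (fun i => pvCondA (s0.drop p) i) m).2 i hF
    obtain ⟨inat, rfl⟩ : ∃ j : Nat, i = (j : Int) := ⟨i.toNat, (Int.toNat_of_nonneg h0).symm⟩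
    have hinm : inat < m := by exact_mod_cast him
    have hbr := pv_bridge s0 p inat m hinm (by push_cast; omega) (by omega)
    rw [hbr] at hPi
    have hcstar : ((p + inat : Nat) : Int) + 1 ∈ pvCuts s0 :=
      (pv_mem_cuts s0 _).mpr ⟨p + inat, by omega, hPi, rfl⟩
    obtain ⟨jstar, hjs, hjeq⟩ := List.mem_iff_getElem.mp hcstar
    have hcstar_hi : ((p + inat : Nat) : Int) + 1 ≤ (p : Int) + m := by push_cast; omega
    have hjk : jstar < PySem.List.bisectRight (pvCuts s0) ((p : Int) + m) := by
      by_contra hcon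
      have := hgt jstar hjs (by omega)
      rw [hjeq] at this
      omega
    have hk : 0 < PySem.List.bisectRight (pvCuts s0) ((p : Int) + m) := by omega
    have hklen : PySem.List.bisectRight (pvCuts s0) ((p : Int) + m) - 1 < (pvCuts s0).length := by omega
    have hege : ((p + inat : Nat) : Int) + 1 ≤ (pvCuts s0)[PySem.List.bisectRight (pvCuts s0) ((p : Int) + m) - 1] := by
      rw [← hjeq]
      exact hmono jstar _ hjs hklen (by omega)
    have hehi : (pvCuts s0)[PySem.List.bisectRight (pvCuts s0) ((p : Int) + m) - 1] ≤ (p : Int) + m :=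
      hlt_le _ hklen (by omega)
    have hegtp : (p : Int) < (pvCuts s0)[PySem.List.bisectRight (pvCuts s0) ((p : Int) + m) - 1] := by
      have : (p : Int) < ((p + inat : Nat) : Int) + 1 := by push_cast; omega
      omega
    have hele : (pvCuts s0)[PySem.List.bisectRight (pvCuts s0) ((p : Int) + m) - 1] ≤ ((p + inat : Nat) : Int) + 1 := by
      obtain ⟨k0, hk0n, hcond0, heeq⟩ := (pv_mem_cuts s0 _).mp (List.getElem_mem hklen)
      have hpk0 : p ≤ k0 := by omega
      have hk0m : k0 < p + m := by omega
      have hbr0 := pv_bridge s0 p (k0 - p) m (by omega) (by push_cast; omega) (by omega)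
      simp only [show p + (k0 - p) = k0 from by omega] at hbr0
      have hP0 : pvCondA (s0.drop p) ((k0 - p : Nat) : Int) = true := by rw [hbr0]; exact hcond0
      have hje : ¬ ((inat : Int) < ((k0 - p : Nat) : Int)) := by
        intro hlt2
        have := hmax (k0 - p) hlt2 (by omega)
        rw [hP0] at this
        exact absurd this (by simp)
      push_cast at hje
      have : k0 ≤ p + inat := by omega
      rw [heeq]
      push_cast
      omega
    have hee : (pvCuts s0)[PySem.List.bisectRight (pvCuts s0) ((p : Int) + m) - 1] = ((p + inat : Nat) : Int) + 1 := le_antisymm hele hege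
    rw [if_pos hk, List.getD_eq_getElem _ _ hklen, if_pos hegtp, hee]
    push_cast
    ring

-- A's cut is between 1 and max_chars
theorem pv_cutA_bounds (s : List Char) (mc : Int) (hmc : 1 ≤ mc) :
    1 ≤ pvCutA s mc ∧ pvCutA s mc ≤ mc := by
  obtain ⟨m, rfl⟩ : ∃ m : Nat, mc = (m : Int) := ⟨mc.toNat, (Int.toNat_of_nonneg (by omega)).symm⟩
  unfold pvCutA
  cases hF : (PySem.List.pyRange ((m : Int) - 1) (-1) (-1)).find? (fun i => pvCondA s i) with
  | none => exact ⟨hmc, le_refl _⟩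
  | some i =>
    obtain ⟨h0, him, _, _⟩ := (pv_find_countdown (fun i => pvCondA s i) m).2 i hF
    change 1 ≤ i + 1 ∧ i + 1 ≤ (m : Int)
    omega

-- dropWhile is a drop, and its length added to takeWhile's gives the whole
theorem pv_dropWhile_eq_drop (l : List Char) (p : Char → Bool) :
    l.dropWhile p = l.drop (l.takeWhile p).length := by
  conv_lhs => rw [show l.dropWhile p = List.drop (l.takeWhile p).length (l.takeWhile p ++ l.dropWhile p) from (List.drop_left' rfl).symm]
  rw [List.takeWhile_append_dropWhile]

theorem pv_takeWhile_add_dropWhile (l : List Char) (p : Char → Bool) :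
    (l.takeWhile p).length + (l.dropWhile p).length = l.length := by
  conv_rhs => rw [← List.takeWhile_append_dropWhile (p := p) (l := l)]
  rw [List.length_append]

-- a left-stripped non-empty list starts with a non-space character
theorem pv_head_not_space (cs : List Char) (h : PySem.Chars.lstrip cs = cs) (hne : cs ≠ []) :
    PySem.Chars.isspace (cs.getD 0 ' ') = false := by
  cases cs with
  | nil => exact absurd rfl hne
  | cons a t =>
    simp only [List.getD_cons_zero]
    by_contra hsp
    simp only [Bool.not_eq_false] at hsp
    unfold PySem.Chars.lstrip at h
    rw [List.dropWhile_cons, hsp] at h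
    simp only [if_true] at h
    have hlen1 := congrArg List.length h
    have hlen2 := List.length_dropWhile_le (p := PySem.Chars.isspace) t
    simp at hlen1
    omega

-- a right-stripped non-empty list ends with a non-space character
theorem pv_last_not_space (cs : List Char) (hr : PySem.Chars.rstrip cs = cs) (hne : cs ≠ []) :
    PySem.Chars.isspace (cs.getLast hne) = false := by
  by_contra h
  simp only [Bool.not_eq_false] at h
  have hrev : cs.reverse ≠ [] := by simpa using hne
  obtain ⟨a, t, hc⟩ : ∃ a t, cs.reverse = a :: t := by
    cases h' : cs.reverse with
    | nil => exact absurd h' hrev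
    | cons a t => exact ⟨a, t, rfl⟩
  have ha : PySem.Chars.isspace a = true := by
    have hh : PySem.Chars.isspace (cs.reverse.head hrev) = true := by
      rw [List.head_reverse]; exact h
    simp only [hc, List.head_cons] at hh
    exact hh
  unfold PySem.Chars.rstrip at hr
  rw [hc, List.dropWhile_cons, ha] at hr
  simp only [if_true] at hr
  have hlen := congrArg List.length hr
  have hlec := congrArg List.length hc
  have := List.length_dropWhile_le (p := PySem.Chars.isspace) t
  simp at hlen hlec
  omega

-- rstrip is a take (a prefix)
theorem pv_rstrip_take (y : List Char) :
    PySem.Chars.rstrip y = y.take (y.length - (y.reverse.takeWhile PySem.Chars.isspace).length) := by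
  unfold PySem.Chars.rstrip
  rw [pv_dropWhile_eq_drop]
  simp [List.reverse_drop]

-- rstrip of an already left-stripped list is still left-stripped
theorem pv_lstrip_rstrip (y : List Char) (h : PySem.Chars.lstrip y = y) :
    PySem.Chars.lstrip (PySem.Chars.rstrip y) = PySem.Chars.rstrip y := by
  rw [pv_rstrip_take]
  cases y with
  | nil => rfl
  | cons a t =>
    have ha : PySem.Chars.isspace a = false := by
      have := pv_head_not_space (a :: t) h (by simp)
      simpa using this
    cases hk : (a :: t).length - ((a :: t).reverse.takeWhile PySem.Chars.isspace).length with
    | zero => rfl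
    | succ k =>
      simp only [List.take_succ_cons]
      unfold PySem.Chars.lstrip
      rw [List.dropWhile_cons, ha]
      simp

-- rstrip is idempotent
theorem pv_rstrip_idem (y : List Char) :
    PySem.Chars.rstrip (PySem.Chars.rstrip y) = PySem.Chars.rstrip y := by
  unfold PySem.Chars.rstrip
  rw [List.reverse_reverse, List.dropWhile_idempotent]

-- the two loops agree under the pointer ↔ suffix correspondence
theorem pv_loops_eq (s0 : List Char) (mc : Int) (hmc : 1 ≤ mc)
    (hr : PySem.Chars.rstrip s0 = s0) :
    ∀ (fuel : Nat) (p : Nat) (blocks : List String), p < s0.length →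
      PySem.Chars.isspace (s0.getD p ' ') = false →
      pvLoopA mc fuel (s0.drop p) blocks = pvLoopB s0 (pvCuts s0) mc fuel p blocks := by
  intro fuel
  induction fuel with
  | zero => intro p blocks _ _; rfl
  | succ fuel ih =>
    intro p blocks hp hhead
    have hne : s0.drop p ≠ [] := by
      intro h; have := congrArg List.length h; simp at this; omega
    have hlen : (s0.drop p).length = s0.length - p := List.length_drop
    unfold pvLoopA pvLoopB
    rw [if_neg (by simp only [List.isEmpty_iff]; exact hne)]
    dsimp only
    by_cases hbig : (s0.length : Int) - (p : Int) > mc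
    · -- long branch: cut a block
      rw [if_neg (by rw [hlen]; push_cast; omega), if_pos hbig]
      have hcb := pv_cutA_bounds (s0.drop p) mc hmc
      obtain ⟨cutn, hcut⟩ : ∃ k : Nat, pvCutA (s0.drop p) mc = (k : Int) :=
        ⟨(pvCutA (s0.drop p) mc).toNat, (Int.toNat_of_nonneg (by omega)).symm⟩
      have hcut1 : 1 ≤ cutn := by omega
      have hq : p + cutn < s0.length := by omega
      have hE := pv_cut_eq s0 mc p hmc (by omega)
      dsimp only at hE
      rw [hE, hcut]
      rw [show (p : Int) + (cutn : Int) = ((p + cutn : Nat) : Int) by push_cast; ring]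
      -- the emitted chunk is the same
      have hchunk : PySem.List.slice (s0.drop p) none (some ((cutn : Nat) : Int)) =
          PySem.List.slice s0 (some ((p : Nat) : Int)) (some ((p + cutn : Nat) : Int)) := by
        rw [PySem.List.slice_to_natCast, PySem.List.slice_natCast]
        rw [Nat.add_sub_cancel_left]
      rw [hchunk]
      -- both recursive arguments are drop (p + cutn + w) of s0
      set q := p + cutn with hqdef
      set D := s0.drop q with hD
      set w := (D.takeWhile PySem.Chars.isspace).length with hw
      have hDlen : D.length = s0.length - q := List.length_drop
      have hDne : D ≠ [] := by
        intro h; have := congrArg List.length h; rw [hDlen] at this; simp at this; omega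
      have hdwne : D.dropWhile PySem.Chars.isspace ≠ [] := by
        intro hnil
        have hall := List.dropWhile_eq_nil_iff.mp hnil
        have hlast : PySem.Chars.isspace (D.getLast hDne) = false := by
          rw [List.getLast_drop]
          exact pv_last_not_space s0 hr _
        have := hall (D.getLast hDne) (List.getLast_mem hDne)
        rw [hlast] at this
        exact absurd this (by simp)
      have hwlt : w < D.length := by
        have h1 := pv_takeWhile_add_dropWhile D PySem.Chars.isspace
        have h2 : 0 < (D.dropWhile PySem.Chars.isspace).length := List.length_pos_iff.mpr hdwne
        omega
      have hpn : q + w < s0.length := by omega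
      have hskip : pvSkipWs s0 s0.length ((q : Nat) : Int) = ((q + w : Nat) : Int) := by
        rw [pv_skipws_gen s0 s0.length q (by omega) (by omega)]
        push_cast; ring
      rw [hskip]
      have hargA : PySem.Chars.lstrip (PySem.List.slice (s0.drop p) (some ((cutn : Nat) : Int)) none) =
          s0.drop (q + w) := by
        rw [PySem.List.slice_from_natCast, List.drop_drop]
        show PySem.Chars.lstrip (s0.drop q) = _
        unfold PySem.Chars.lstrip
        rw [pv_dropWhile_eq_drop, ← hD, ← hw, hD, List.drop_drop]
      have hdrop_new : s0.drop (q + w) = D.dropWhile PySem.Chars.isspace := by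
        conv_rhs => rw [pv_dropWhile_eq_drop, ← hw, hD, List.drop_drop]
      have hhead' : PySem.Chars.isspace (s0.getD (q + w) ' ') = false := by
        have hg : s0.getD (q + w) ' ' = (s0.drop (q + w)).getD 0 ' ' := by
          simp [List.getD_eq_getElem?_getD, List.getElem?_drop]
        rw [hg, hdrop_new]
        cases hdd : D.dropWhile PySem.Chars.isspace with
        | nil => exact absurd hdd hdwne
        | cons a t =>
          simp only [List.getD_cons_zero]
          have := List.head_dropWhile_not PySem.Chars.isspace (l := D) hdwne
          simp only [hdd, List.head_cons] at this
          simpa using this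
      rw [hargA]
      exact ih (q + w) _ hpn hhead'
    · -- short branch: the tail block
      rw [if_pos (by rw [hlen]; push_cast; omega), if_neg hbig]
      rw [PySem.List.slice_from_natCast]
      have h1 : PySem.Chars.isspace ((s0.drop p).getD 0 ' ') = false := by
        have hg : (s0.drop p).getD 0 ' ' = s0.getD p ' ' := by
          simp [List.getD_eq_getElem?_getD, List.getElem?_drop]
        rw [hg]; exact hhead
      have h2 : PySem.Chars.isspace ((s0.drop p).getLast hne) = false := by
        rw [List.getLast_drop]
        exact pv_last_not_space s0 hr _
      rw [pv_strip_id (s0.drop p) hne h1 h2]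

-- ===== VERDICT (by name: the statement is the Claim_ definition above) =====
theorem split_paragraph_into_blocks_py_spec : Claim_equal_split_paragraph_into_blocks_py := by
  intro pb mc _hdom hpre
  unfold Spec_split_paragraph_into_blocks_py
  unfold split_paragraph_into_blocks_py split_paragraph_into_blocks_py_alt
  dsimp only
  by_cases hs : (PySem.Chars.strip pb.toList).isEmpty = true
  · rw [if_pos hs, if_pos hs]
  · rw [if_neg hs, if_neg hs]
    have hne : PySem.Chars.strip pb.toList ≠ [] := by
      simpa [List.isEmpty_iff] using hs
    have hmc : 1 ≤ mc := by
      rcases hpre with h | h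
      · exact h
      · exact absurd h hne
    have hr : PySem.Chars.rstrip (PySem.Chars.strip pb.toList) = PySem.Chars.strip pb.toList := by
      unfold PySem.Chars.strip
      exact pv_rstrip_idem _
    have hlid : PySem.Chars.lstrip (PySem.Chars.lstrip pb.toList) = PySem.Chars.lstrip pb.toList := by
      unfold PySem.Chars.lstrip
      rw [List.dropWhile_idempotent]
    have hl : PySem.Chars.lstrip (PySem.Chars.strip pb.toList) = PySem.Chars.strip pb.toList := by
      unfold PySem.Chars.strip
      exact pv_lstrip_rstrip _ hlid
    have h0 : 0 < (PySem.Chars.strip pb.toList).length := List.length_pos_iff.mpr hne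
    have hh : PySem.Chars.isspace ((PySem.Chars.strip pb.toList).getD 0 ' ') = false :=
      pv_head_not_space _ hl hne
    have hmain := pv_loops_eq (PySem.Chars.strip pb.toList) mc hmc hr
      ((PySem.Chars.strip pb.toList).length + 1) 0 [] h0 hh
    simpa using hmain
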